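-- pv_equiv track=rewrite | github.com/8-oo-8/python_files | funnyStuff/longest_word.py | long_high_word
-- ===== SOURCE A (Python) =====
-- def long_high_word(wordlist):
--     '''
--     dict_length = dict.fromkeys(wordlist, (0, 0))
--     for key in dict_length.keys():
--         dict_length[key] = (len(key), ord(key[0]))
--     dict_length = dict(sorted(dict_length.items(), key=lambda x:x[1][1], reverse=True))
--     dict_length = dict(sorted(dict_length.items(), key=lambda x:x[1][0], reverse=True))
--     return list(dict_length.keys())[0]
--     '''
--     longest = 0
--     for element in wordlist:
--         if len(element) > longest:
--             longest = len(element)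
--     options = []
--     for element in wordlist:
--         if len(element) == longest:
--             options.append(element)
--     if len(options) > 1:
--         options.sort(reverse=True)
--     return options[0]
-- ===== SOURCE B (Python) =====
-- def long_high_word(wordlist):
--     return max(wordlist, key=lambda w: (len(w), w))
-- ===== Notes on version B (the rewrite author's own statement) =====
-- stated objective: simpler
-- what changed: A scans for the max length, filters the ties in a second pass and sorts them descending to pick the first; B is a single-pass argmax with the tuple key (len, word).
import Mathlib
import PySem

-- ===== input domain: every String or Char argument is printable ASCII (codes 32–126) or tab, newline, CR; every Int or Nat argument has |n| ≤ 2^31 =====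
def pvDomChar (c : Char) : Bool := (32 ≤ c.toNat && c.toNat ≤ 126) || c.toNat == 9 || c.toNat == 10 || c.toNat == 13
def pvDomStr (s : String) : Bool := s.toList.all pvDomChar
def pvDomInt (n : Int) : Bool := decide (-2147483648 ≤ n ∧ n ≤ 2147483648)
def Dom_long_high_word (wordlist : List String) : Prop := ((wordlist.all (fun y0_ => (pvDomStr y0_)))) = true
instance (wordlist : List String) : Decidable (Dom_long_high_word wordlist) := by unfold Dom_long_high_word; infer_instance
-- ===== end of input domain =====

-- B replaces A's max-length scan + tie filter + descending tie sort by a single-pass argmax with the tuple key (len, word): simpler.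

-- ===== PORT A =====
-- A: scan for max length, collect all words of that length, sort the ties descending, take the first.
def long_high_word (wordlist : List String) : String :=
  let longest : Int := wordlist.foldl
    (fun longest element => if PySem.Str.len element > longest then PySem.Str.len element else longest) 0
  let options : List String := wordlist.foldl
    (fun options element => if PySem.Str.len element == longest then options ++ [element] else options) []
  let options := if options.length > 1 then PySem.List.sorted options (fun x => x) true else options
  -- options[0]; IndexError on the empty list is excluded by Pre_long_high_word
  PySem.List.pyGetD options 0 ""

-- ===== PORT B =====
-- B: max(wordlist, key=lambda w: (len(w), w)); ValueError on empty is excluded by Pre_long_high_word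
def long_high_word_alt (wordlist : List String) : String :=
  (PySem.List.max2? wordlist (fun w => PySem.Str.len w) (fun w => w)).getD ""

-- ===== PRECONDITION & SPEC =====
-- A raises IndexError (and B ValueError) on the empty list; Pre_ excludes exactly that input.
def Pre_long_high_word (wordlist : List String) : Prop := wordlist ≠ []
instance (wordlist : List String) : Decidable (Pre_long_high_word wordlist) := by
  unfold Pre_long_high_word; infer_instance
def pvWitness_long_high_word : List String := (["ab", "c", "xy"])

def Spec_long_high_word (wordlist : List String) (out : String) : Prop := out = long_high_word_alt wordlist
instance (wordlist : List String) (out : String) : Decidable (Spec_long_high_word wordlist out) := by unfold Spec_long_high_word; infer_instance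

-- ===== CLAIM (what is proved, stated in full; the proofs are below) =====
def Claim_equal_long_high_word : Prop := ∀ (wordlist : List String), Dom_long_high_word wordlist → Pre_long_high_word wordlist → Spec_long_high_word wordlist (long_high_word wordlist)

-- ===== LEMMAS AND PROOFS =====

-- lexicographic "at most" on the key (len w, w)
def pvLexLe (a b : String) : Prop :=
  PySem.Str.len a < PySem.Str.len b ∨ (PySem.Str.len a = PySem.Str.len b ∧ a ≤ b)

-- the characterising property: r is the (len, word)-lex maximum of wordlist
def pvIsMax (wordlist : List String) (r : String) : Prop :=
  r ∈ wordlist ∧ ∀ w ∈ wordlist, pvLexLe w r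

theorem pvLexLe_refl (a : String) : pvLexLe a a := Or.inr ⟨rfl, le_refl a⟩

theorem pvLexLe_trans {a b c : String} (h1 : pvLexLe a b) (h2 : pvLexLe b c) : pvLexLe a c := by
  rcases h1 with h1 | ⟨h1, h1'⟩ <;> rcases h2 with h2 | ⟨h2, h2'⟩
  · exact Or.inl (lt_trans h1 h2)
  · exact Or.inl (h2 ▸ h1)
  · exact Or.inl (h1 ▸ h2)
  · exact Or.inr ⟨h1.trans h2, le_trans h1' h2'⟩

theorem pvIsMax_unique {wordlist : List String} {r1 r2 : String}
    (h1 : pvIsMax wordlist r1) (h2 : pvIsMax wordlist r2) : r1 = r2 := by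
  have ha := h1.2 r2 h2.1
  have hb := h2.2 r1 h1.1
  rcases ha with ha | ⟨_, ha'⟩ <;> rcases hb with hb | ⟨_, hb'⟩ <;> first
    | omega
    | exact le_antisymm hb' ha'

-- the max-length scan: its result bounds every length, and is 0 or an attained length
theorem pvFoldMax_spec (wordlist : List String) (init : Int) :
    init ≤ wordlist.foldl (fun longest element =>
        if PySem.Str.len element > longest then PySem.Str.len element else longest) init ∧
    (∀ w ∈ wordlist, PySem.Str.len w ≤ wordlist.foldl (fun longest element =>
        if PySem.Str.len element > longest then PySem.Str.len element else longest) init) ∧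
    (wordlist.foldl (fun longest element =>
        if PySem.Str.len element > longest then PySem.Str.len element else longest) init = init ∨
      ∃ w ∈ wordlist, PySem.Str.len w = wordlist.foldl (fun longest element =>
        if PySem.Str.len element > longest then PySem.Str.len element else longest) init) := by
  induction wordlist generalizing init with
  | nil => simp
  | cons x xs ih =>
    simp only [List.foldl_cons]
    by_cases hx : PySem.Str.len x > init
    · rw [if_pos hx]
      obtain ⟨h1, h2, h3⟩ := ih (PySem.Str.len x)
      refine ⟨le_trans (le_of_lt hx) h1, ?_, ?_⟩
      · intro w hw
        rcases List.mem_cons.mp hw with hw | hw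
        · exact hw ▸ h1
        · exact h2 w hw
      · rcases h3 with h3 | ⟨w, hw, hw'⟩
        · exact Or.inr ⟨x, List.mem_cons_self, h3.symm ▸ rfl⟩
        · exact Or.inr ⟨w, List.mem_cons_of_mem x hw, hw'⟩
    · rw [if_neg hx]
      obtain ⟨h1, h2, h3⟩ := ih init
      refine ⟨h1, ?_, ?_⟩
      · intro w hw
        rcases List.mem_cons.mp hw with hw | hw
        · exact hw ▸ le_trans (le_of_not_gt hx) h1
        · exact h2 w hw
      · rcases h3 with h3 | ⟨w, hw, hw'⟩
        · exact Or.inl h3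
        · exact Or.inr ⟨w, List.mem_cons_of_mem x hw, hw'⟩

theorem pvStrLen_nonneg (s : String) : 0 ≤ PySem.Str.len s := by
  rw [PySem.Str.len_eq]; exact_mod_cast Nat.zero_le _

-- A's result is the (len, word)-lex maximum
theorem pvA_isMax (wordlist : List String) (h : wordlist ≠ []) :
    pvIsMax wordlist (long_high_word wordlist) := by
  simp only [long_high_word]
  set longest := wordlist.foldl (fun longest element =>
      if PySem.Str.len element > longest then PySem.Str.len element else longest) 0 with hlongest
  obtain ⟨h0, hub, hat⟩ := pvFoldMax_spec wordlist 0
  rw [PySem.List.foldl_append_if (fun element => PySem.Str.len element == longest) (fun x => x)]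
  simp only [List.nil_append, List.map_id']
  set options := wordlist.filter (fun element => PySem.Str.len element == longest) with hopts
  -- options is nonempty: some word attains longest
  have hmem : ∃ w ∈ wordlist, PySem.Str.len w = longest := by
    rcases hat with hz | hat
    · obtain ⟨w, hw⟩ := List.exists_mem_of_ne_nil wordlist h
      have := hub w hw
      have := pvStrLen_nonneg w
      exact ⟨w, hw, by omega⟩
    · exact hat
  obtain ⟨w0, hw0, hw0len⟩ := hmem
  have hw0opt : w0 ∈ options := by
    rw [hopts, List.mem_filter]
    exact ⟨hw0, by simp only [beq_iff_eq]; exact hw0len⟩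
  -- the key facts about options
  have hoptsub : ∀ w ∈ options, w ∈ wordlist ∧ PySem.Str.len w = longest := by
    intro w hw
    rw [hopts, List.mem_filter] at hw
    exact ⟨hw.1, by simpa only [beq_iff_eq] using hw.2⟩
  have hall : ∀ w ∈ wordlist, PySem.Str.len w = longest → w ∈ options := by
    intro w hw hlen
    rw [hopts, List.mem_filter]
    exact ⟨hw, by simp only [beq_iff_eq]; exact hlen⟩
  by_cases hlen1 : options.length > 1
  · rw [if_pos (by exact_mod_cast hlen1)]
    have hne : PySem.List.sorted options (fun x => x) true ≠ [] := by
      intro hnil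
      have := (PySem.List.sorted_perm options (fun x => x) true).length_eq
      rw [hnil] at this
      simp at this
      omega
    obtain ⟨m, t, hmt⟩ := List.exists_cons_of_ne_nil hne
    rw [hmt]
    rw [PySem.List.pyGetD_zero_cons]
    have hmmem : m ∈ options := by
      have : m ∈ PySem.List.sorted options (fun x => x) true := by rw [hmt]; exact List.mem_cons_self
      exact ((PySem.List.sorted_perm options (fun x => x) true).mem_iff).mp this
    have hge := PySem.List.key_head_sorted_rev_ge options (fun x => x) hmt
    obtain ⟨hmwl, hmlen⟩ := hoptsub m hmmem
    refine ⟨hmwl, ?_⟩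
    intro w hw
    have hwle := hub w hw
    by_cases hweq : PySem.Str.len w = longest
    · exact Or.inr ⟨by omega, hge w (hall w hw hweq)⟩
    · exact Or.inl (by omega)
  · rw [if_neg (by exact_mod_cast hlen1)]
    -- options has exactly one element
    have hlenpos : 0 < options.length := List.length_pos_of_mem hw0opt
    have hone : options.length = 1 := by omega
    obtain ⟨r, hr⟩ := List.length_eq_one_iff.mp hone
    rw [hr, PySem.List.pyGetD_zero_cons]
    have hrmem : r ∈ options := by rw [hr]; exact List.mem_cons_self
    obtain ⟨hrwl, hrlen⟩ := hoptsub r hrmem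
    refine ⟨hrwl, ?_⟩
    intro w hw
    have hwle := hub w hw
    by_cases hweq : PySem.Str.len w = longest
    · have : w ∈ options := hall w hw hweq
      rw [hr, List.mem_singleton] at this
      exact this ▸ pvLexLe_refl w
    · exact Or.inl (by omega)

-- the argmax step of max2? with key (len w, w), named so the fold lemmas state cleanly
def pvStep : Option String → String → Option String
  | none, x => some x
  | some mm, x =>
      if (decide (PySem.Str.len mm < PySem.Str.len x) ||
          (!decide (PySem.Str.len x < PySem.Str.len mm) && decide (mm < x))) = true
      then some x else some mm

theorem pvMax2_eq (wordlist : List String) :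
    PySem.List.max2? wordlist (fun w => PySem.Str.len w) (fun w => w) =
      wordlist.foldl pvStep none := by
  unfold PySem.List.max2?
  apply PySem.List.foldl_congr_mem
  intro acc x _
  cases acc <;> rfl

theorem pvMax2_spec (wordlist : List String) (acc : Option String) {m : String}
    (hres : wordlist.foldl pvStep acc = some m) :
    (m ∈ wordlist ∨ acc = some m) ∧ (∀ w ∈ wordlist, pvLexLe w m) ∧
      (∀ a, acc = some a → pvLexLe a m) := by
  induction wordlist generalizing acc with
  | nil =>
    simp only [List.foldl_nil] at hres
    exact ⟨Or.inr hres, by simp, fun a ha => by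
      rw [ha] at hres; exact (Option.some_inj.mp hres) ▸ pvLexLe_refl a⟩
  | cons x xs ih =>
    simp only [List.foldl_cons] at hres
    cases acc with
    | none =>
      simp only [pvStep] at hres
      obtain ⟨h1, h2, h3⟩ := ih (some x) hres
      have hxm : pvLexLe x m := h3 x rfl
      refine ⟨?_, ?_, by simp⟩
      · rcases h1 with h1 | h1
        · exact Or.inl (List.mem_cons_of_mem x h1)
        · exact Or.inl (Option.some_inj.mp h1 ▸ List.mem_cons_self)
      · intro w hw
        rcases List.mem_cons.mp hw with hw | hw
        · exact hw ▸ hxm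
        · exact h2 w hw
    | some a =>
      simp only [pvStep] at hres
      by_cases hcond : (decide (PySem.Str.len a < PySem.Str.len x) ||
          (!decide (PySem.Str.len x < PySem.Str.len a) && decide (a < x))) = true
      · rw [if_pos hcond] at hres
        obtain ⟨h1, h2, h3⟩ := ih (some x) hres
        have hxm : pvLexLe x m := h3 x rfl
        have hax : pvLexLe a x := by
          simp only [Bool.or_eq_true, Bool.and_eq_true, Bool.not_eq_eq_eq_not, Bool.not_true,
            decide_eq_true_eq, decide_eq_false_iff_not] at hcond
          by_cases hlt : PySem.Str.len a < PySem.Str.len x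
          · exact Or.inl hlt
          · rcases hcond with hc | ⟨hc1, hc2⟩
            · exact absurd hc hlt
            · exact Or.inr ⟨by omega, le_of_lt hc2⟩
        refine ⟨?_, ?_, ?_⟩
        · rcases h1 with h1 | h1
          · exact Or.inl (List.mem_cons_of_mem x h1)
          · exact Or.inl (Option.some_inj.mp h1 ▸ List.mem_cons_self)
        · intro w hw
          rcases List.mem_cons.mp hw with hw | hw
          · exact hw ▸ hxm
          · exact h2 w hw
        · intro b hb
          exact pvLexLe_trans ((Option.some_inj.mp hb) ▸ hax) hxm
      · rw [if_neg hcond] at hres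
        obtain ⟨h1, h2, h3⟩ := ih (some a) hres
        have ham : pvLexLe a m := h3 a rfl
        have hxa : pvLexLe x a := by
          simp only [Bool.or_eq_true, Bool.and_eq_true, Bool.not_eq_eq_eq_not, Bool.not_true,
            decide_eq_true_eq, decide_eq_false_iff_not, not_or, not_and] at hcond
          obtain ⟨hc1, hc2⟩ := hcond
          by_cases hlt : PySem.Str.len x < PySem.Str.len a
          · exact Or.inl hlt
          · exact Or.inr ⟨by omega, le_of_not_gt (hc2 hlt)⟩
        refine ⟨?_, ?_, ?_⟩
        · rcases h1 with h1 | h1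
          · exact Or.inl (List.mem_cons_of_mem x h1)
          · exact Or.inr h1
        · intro w hw
          rcases List.mem_cons.mp hw with hw | hw
          · exact hw ▸ pvLexLe_trans hxa ham
          · exact h2 w hw
        · intro b hb
          exact h3 b hb

theorem pvFoldStep_some (l : List String) (a : String) :
    ∃ m, l.foldl pvStep (some a) = some m := by
  induction l generalizing a with
  | nil => exact ⟨a, rfl⟩
  | cons y ys ih =>
    simp only [List.foldl_cons, pvStep]
    by_cases hc : (decide (PySem.Str.len a < PySem.Str.len y) ||
        (!decide (PySem.Str.len y < PySem.Str.len a) && decide (a < y))) = true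
    · rw [if_pos hc]; exact ih y
    · rw [if_neg hc]; exact ih a

-- B's result is the (len, word)-lex maximum
theorem pvB_isMax (wordlist : List String) (h : wordlist ≠ []) :
    pvIsMax wordlist (long_high_word_alt wordlist) := by
  unfold long_high_word_alt
  rw [pvMax2_eq]
  have hsome : ∃ m, wordlist.foldl pvStep none = some m := by
    obtain ⟨x, xs, rfl⟩ := List.exists_cons_of_ne_nil h
    simp only [List.foldl_cons, pvStep]
    exact pvFoldStep_some xs x
  obtain ⟨m, hm⟩ := hsome
  rw [hm]
  simp only [Option.getD_some]
  obtain ⟨h1, h2, _⟩ := pvMax2_spec wordlist none hm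
  rcases h1 with h1 | h1
  · exact ⟨h1, h2⟩
  · exact absurd h1 (by simp)

-- ===== VERDICT (by name: the statement is the Claim_ definition above) =====
theorem long_high_word_spec : Claim_equal_long_high_word := by
  intro wordlist _ hpre
  unfold Spec_long_high_word
  exact pvIsMax_unique (pvA_isMax wordlist hpre) (pvB_isMax wordlist hpre)
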